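-- pv_equiv track=rewrite | github.com/insarlab/MintPy | mintpy/ifgram_inversion.py | subsplit_boxes4_workers
-- ===== SOURCE A (Python) =====
-- def subsplit_boxes4_workers(box, num_split, dimension='y'):
--     """ This is a bit hacky, but after creating the patches,
--     this function further divides the box size into `num_split` different subboxes.
--     Note that `split2boxes`  splits based on chunk_size (memory-based).
--
--     :param box: [x0, y0, x1, y1]: list[int] of size 4
--     :param num_split: int, the number of subboxes to split a box into
--     :param dimension: str = 'y' or 'x', the dimension along which to split the boxes
--     """
--
--     # Flip x and y coordinates if splitting along 'x' dimension
--     x0, y0, x1, y1 = box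
--     subboxes = []
--
--     if dimension == 'y':
--         y_diff = y1 - y0
--         # `start` and `end` are the new bounds of the subdivided box
--         for i in range(num_split):
--             start = (i * y_diff) // num_split
--             end = ((i + 1) * y_diff) // num_split
--             subboxes.append([x0, start, x1, end])
--     elif dimension == 'x':
--         x_diff = x1 - x0
--         for i in range(num_split):
--             start = (i * x_diff) // num_split
--             end = ((i + 1) * x_diff) // num_split
--             subboxes.append([start, y0, end, y1])
--     else:
--         raise Exception("Unknown value for dimension parameter:", dimension)
--
--     return subboxes
-- ===== SOURCE B (Python) =====
-- def subsplit_boxes4_workers(box, num_split, dimension='y'):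
--     x0, y0, x1, y1 = box
--     if dimension == 'y':
--         diff = y1 - y0
--         wrap = lambda s, e: [x0, s, x1, e]
--     elif dimension == 'x':
--         diff = x1 - x0
--         wrap = lambda s, e: [s, y0, e, y1]
--     else:
--         raise Exception("Unknown value for dimension parameter:", dimension)
--     if num_split <= 0:
--         return []
--     # Bresenham-style error accumulator: one divmod up front, then only
--     # additions/comparisons per step; cur walks the boundaries i*diff//num_split.
--     q, r = divmod(diff, num_split)
--     out = []
--     cur = err = 0
--     for _ in range(num_split):
--         nxt = cur + q
--         err += r
--         if err >= num_split:
--             err -= num_split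
--             nxt += 1
--         out.append(wrap(cur, nxt))
--         cur = nxt
--     return out
-- ===== Notes on version B (the rewrite author's own statement) =====
-- stated objective: alternative
-- what changed: B replaces A's per-iteration multiplications and floor divisions (start=(i*diff)//n, end=((i+1)*diff)//n) with a Bresenham-style error accumulator: one divmod up front, then each boundary is advanced by the quotient plus a carry maintained through an additive remainder counter.
import Mathlib
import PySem

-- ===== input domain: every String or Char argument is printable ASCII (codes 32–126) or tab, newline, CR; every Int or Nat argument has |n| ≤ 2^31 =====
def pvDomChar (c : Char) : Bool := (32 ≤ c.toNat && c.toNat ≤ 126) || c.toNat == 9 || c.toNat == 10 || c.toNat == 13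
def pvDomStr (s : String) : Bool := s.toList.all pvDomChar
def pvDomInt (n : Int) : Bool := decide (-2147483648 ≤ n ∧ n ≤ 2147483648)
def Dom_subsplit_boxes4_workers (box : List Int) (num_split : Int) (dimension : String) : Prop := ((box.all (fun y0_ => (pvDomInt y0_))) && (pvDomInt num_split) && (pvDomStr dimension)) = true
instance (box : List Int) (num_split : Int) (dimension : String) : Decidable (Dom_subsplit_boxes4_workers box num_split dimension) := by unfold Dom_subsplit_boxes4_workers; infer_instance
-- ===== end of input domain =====

-- B replaces A's per-step multiply-and-floor-divide boundary computation with a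
-- Bresenham-style error accumulator (one divmod up front, additive carries after).


-- shared unpacking helper ('x0, y0, x1, y1 = box'; both Pythons unpack the same way)
def pvList4 {b : Type} (l : List Int) (f : Int -> Int -> Int -> Int -> b) (d : b) : b :=
  match l with
  | [p, q, r, s] => f p q r s
  | _ => d

-- ===== PORT A =====
def subsplit_boxes4_workers (box : List Int) (num_split : Int) (dimension : String) : List (List Int) :=
  pvList4 box (fun x0 y0 x1 y1 =>
    if dimension = "y" then
      let y_diff := y1 - y0
      (PySem.List.pyRange 0 num_split 1).foldl (fun subboxes i =>
        let start := PySem.Int.floordiv (i * y_diff) num_split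
        let «end» := PySem.Int.floordiv ((i + 1) * y_diff) num_split
        subboxes ++ [[x0, start, x1, «end»]]) []
    else if dimension = "x" then
      let x_diff := x1 - x0
      (PySem.List.pyRange 0 num_split 1).foldl (fun subboxes i =>
        let start := PySem.Int.floordiv (i * x_diff) num_split
        let «end» := PySem.Int.floordiv ((i + 1) * x_diff) num_split
        subboxes ++ [[start, y0, «end», y1]]) []
    else [])  -- Python raises Exception here; excluded by Pre_
    []        -- Python raises ValueError (unpacking) here; excluded by Pre_

-- ===== PORT B =====
-- the error-accumulator loop of Source B: state (out, cur, err), loop counter only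
def pvBresLoop (num_split q r : Int) (wrap : Int → Int → List Int) : List (List Int) :=
  ((PySem.List.pyRange 0 num_split 1).foldl
    (fun (st : List (List Int) × Int × Int) _ =>
      let out := st.1
      let cur := st.2.1
      let nxt := cur + q
      let err := st.2.2 + r
      let p := if num_split ≤ err then (err - num_split, nxt + 1) else (err, nxt)
      (out ++ [wrap cur p.2], p.2, p.1)) ([], 0, 0)).1

def subsplit_boxes4_workers_alt (box : List Int) (num_split : Int) (dimension : String) : List (List Int) :=
  pvList4 box (fun x0 y0 x1 y1 =>
    let p : Option (Int × (Int → Int → List Int)) :=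
      if dimension = "y" then some (y1 - y0, fun s e => [x0, s, x1, e])
      else if dimension = "x" then some (x1 - x0, fun s e => [s, y0, e, y1])
      else none  -- Python raises Exception here; excluded by Pre_
    match p with
    | none => []
    | some (diff, wrap) =>
      if num_split ≤ 0 then []
      else
        let q := PySem.Int.floordiv diff num_split
        let r := PySem.Int.mod diff num_split
        pvBresLoop num_split q r wrap) []

-- ===== PRECONDITION & SPEC =====
-- Pre_ excludes exactly the inputs where A raises: a box whose length is not 4
-- (ValueError on unpacking) and a dimension other than 'y'/'x' (explicit Exception).
def Pre_subsplit_boxes4_workers (box : List Int) (num_split : Int) (dimension : String) : Prop :=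
  box.length = 4 ∧ (dimension = "y" ∨ dimension = "x")
instance (box : List Int) (num_split : Int) (dimension : String) : Decidable (Pre_subsplit_boxes4_workers box num_split dimension) := by unfold Pre_subsplit_boxes4_workers; infer_instance

def pvWitness_subsplit_boxes4_workers : List Int × Int × String := ([1, 2, 10, 9], 3, "x")

def Spec_subsplit_boxes4_workers (box : List Int) (num_split : Int) (dimension : String) (out : List (List Int)) : Prop := out = subsplit_boxes4_workers_alt box num_split dimension
instance (box : List Int) (num_split : Int) (dimension : String) (out : List (List Int)) : Decidable (Spec_subsplit_boxes4_workers box num_split dimension out) := by unfold Spec_subsplit_boxes4_workers; infer_instance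

-- ===== CLAIM =====
def Claim_equal_subsplit_boxes4_workers : Prop := ∀ (box : List Int) (num_split : Int) (dimension : String), Dom_subsplit_boxes4_workers box num_split dimension → Pre_subsplit_boxes4_workers box num_split dimension → Spec_subsplit_boxes4_workers box num_split dimension (subsplit_boxes4_workers box num_split dimension)

-- ===== LEMMAS AND PROOFS =====

-- loop invariant: after k iterations cur = (k*diff)//n and err = (k*diff) mod n,
-- and out holds the first k subboxes
lemma pvBres_inv (n diff : Int) (hn : 0 < n) (wrap : Int → Int → List Int) (k : Nat) :
    (PySem.List.pyRange 0 (k : Int) 1).foldl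
      (fun (st : List (List Int) × Int × Int) _ =>
        let out := st.1
        let cur := st.2.1
        let nxt := cur + PySem.Int.floordiv diff n
        let err := st.2.2 + PySem.Int.mod diff n
        let p := if n ≤ err then (err - n, nxt + 1) else (err, nxt)
        (out ++ [wrap cur p.2], p.2, p.1)) ([], 0, 0)
    = ((List.range k).map (fun (i : Nat) =>
          wrap (PySem.Int.floordiv ((i : Int) * diff) n)
               (PySem.Int.floordiv (((i : Int) + 1) * diff) n)),
       PySem.Int.floordiv ((k : Int) * diff) n,
       PySem.Int.mod ((k : Int) * diff) n) := by
  induction k with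
  | zero =>
    simp [PySem.List.pyRange_one_eq_nil, PySem.Int.floordiv, PySem.Int.mod]
  | succ m ih =>
    have hstep : PySem.List.pyRange 0 ((m : Int) + 1) 1
        = PySem.List.pyRange 0 (m : Int) 1 ++ [(m : Int)] :=
      PySem.List.pyRange_one_succ_right (by positivity)
    push_cast
    rw [hstep, List.foldl_append, ih]
    simp only [List.foldl_cons, List.foldl_nil, List.range_succ]
    -- arithmetic facts
    have hq := PySem.Int.floordiv_mul_add_mod diff n
    have hk := PySem.Int.floordiv_mul_add_mod ((m : Int) * diff) n
    have hrb : 0 ≤ PySem.Int.mod diff n ∧ PySem.Int.mod diff n < n := by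
      rw [PySem.Int.mod_eq_emod_of_pos hn]
      exact ⟨Int.emod_nonneg _ (by omega), Int.emod_lt_of_pos _ hn⟩
    have hkb : 0 ≤ PySem.Int.mod ((m : Int) * diff) n ∧ PySem.Int.mod ((m : Int) * diff) n < n := by
      rw [PySem.Int.mod_eq_emod_of_pos hn]
      exact ⟨Int.emod_nonneg _ (by omega), Int.emod_lt_of_pos _ hn⟩
    set q := PySem.Int.floordiv diff n with hqdef
    set r := PySem.Int.mod diff n with hrdef
    set B := PySem.Int.floordiv ((m : Int) * diff) n with hBdef
    set E := PySem.Int.mod ((m : Int) * diff) n with hEdef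
    by_cases hc : n ≤ E + r
    · have hB1 : PySem.Int.floordiv (((m : Int) + 1) * diff) n = B + q + 1 := by
        rw [PySem.Int.floordiv_eq_iff_of_pos hn]
        constructor <;> nlinarith
      have hE1 : PySem.Int.mod (((m : Int) + 1) * diff) n = E + r - n := by
        have h := PySem.Int.floordiv_mul_add_mod (((m : Int) + 1) * diff) n
        rw [hB1] at h; nlinarith
      simp only [if_pos hc, hB1, hE1]
      simp [hB1, ← hBdef]
    · have hB1 : PySem.Int.floordiv (((m : Int) + 1) * diff) n = B + q := by
        rw [PySem.Int.floordiv_eq_iff_of_pos hn]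
        constructor <;> nlinarith
      have hE1 : PySem.Int.mod (((m : Int) + 1) * diff) n = E + r := by
        have h := PySem.Int.floordiv_mul_add_mod (((m : Int) + 1) * diff) n
        rw [hB1] at h; nlinarith
      simp only [if_neg hc, hB1, hE1]
      simp [hB1, ← hBdef]

-- A's per-dimension loop equals B's error-accumulator loop
lemma pvBres_eq (diff m : Int) (wrap : Int → Int → List Int) :
    (PySem.List.pyRange 0 m 1).foldl (fun subboxes i =>
        subboxes ++ [wrap (PySem.Int.floordiv (i * diff) m)
                          (PySem.Int.floordiv ((i + 1) * diff) m)]) []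
      = (if m ≤ 0 then []
         else pvBresLoop m (PySem.Int.floordiv diff m) (PySem.Int.mod diff m) wrap) := by
  by_cases hm : m ≤ 0
  · simp [hm, PySem.List.pyRange_one_eq_nil]
  · obtain ⟨n, rfl⟩ : ∃ n : Nat, m = (n : Int) := ⟨m.toNat, by omega⟩
    rw [if_neg hm]
    unfold pvBresLoop
    rw [pvBres_inv (n : Int) diff (by omega) wrap n]
    rw [PySem.List.foldl_append_singleton_eq_map
        (f := fun i => wrap (PySem.Int.floordiv (i * diff) (n : Int))
                            (PySem.Int.floordiv ((i + 1) * diff) (n : Int)))]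
    rw [PySem.List.pyRange_zero_natCast, List.map_map]
    simp

-- ===== VERDICT =====
theorem subsplit_boxes4_workers_spec : Claim_equal_subsplit_boxes4_workers := by
  intro box num_split dimension _ hpre
  obtain ⟨hlen, hdim⟩ := hpre
  match box, hlen with
  | [x0, y0, x1, y1], _ =>
    unfold Spec_subsplit_boxes4_workers subsplit_boxes4_workers subsplit_boxes4_workers_alt pvList4
    rcases hdim with h | h
    · simp only [h, reduceIte, String.reduceEq]
      exact pvBres_eq (y1 - y0) num_split (fun s e => [x0, s, x1, e])
    · simp only [h, reduceIte, String.reduceEq]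
      exact pvBres_eq (x1 - x0) num_split (fun s e => [s, y0, e, y1])
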